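-- pv_equiv track=rewrite | github.com/chipsec/chipsec | chipsec/logger.py | bytes2string
-- ===== SOURCE A (Python) =====
-- import string
--
-- def bytes2string(buffer, length=16):
--     '''Generate text string based on str with ASCII side panel'''
--     output = []
--     num_string = []
--     ascii_string = []
--     index = 1
--     for c in buffer:
--         num_string += ['{:02X} '.format(ord(c))]
--         if not (c in string.printable) or (c in string.whitespace):
--             ascii_string += ['{}'.format(' ')]
--         else:
--             ascii_string += [f'{c}']
--         if (index % length) == 0:
--             num_string += ['| ']
--             num_string += ascii_string
--             output.append(''.join(num_string))
--             ascii_string = []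
--             num_string = []
--         index += 1
--     if 0 != (len(buffer) % length):
--         num_string += [(length - len(buffer) % length) * 3 * ' ']
--         num_string += ['| ']
--         num_string += ascii_string
--         output.append(''.join(num_string))
--     return '\n'.join(output)
-- ===== SOURCE B (Python) =====
-- import string
--
--
-- def bytes2string(buffer, length=16):
--     '''Generate text string based on str with ASCII side panel'''
--     output = []
--     for i in range(0, len(buffer), length):
--         chunk = buffer[i:i + length]
--         hex_part = ''.join('{:02X} '.format(ord(c)) for c in chunk)
--         ascii_part = ''.join(
--             ' ' if not (c in string.printable) or (c in string.whitespace) else c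
--             for c in chunk)
--         padding = (length - len(chunk)) * 3 * ' '
--         output.append(hex_part + padding + '| ' + ascii_part)
--     return '\n'.join(output)
-- ===== Notes on version B (the rewrite author's own statement) =====
-- stated objective: simpler
-- what changed: Replaces A's byte-by-byte loop with a running index, a modulo flush test, mutable row accumulators and a separate padded-tail block by slicing the buffer into chunks of size length up front and rendering every chunk (full or final partial) uniformly as hex part, padding, separator and ascii panel.
-- outside the precondition, e.g. on bytes2string('ABCDE', -2): A returns '41 42 | AB\n43 44 | CD\n45 | E', B returns ''
import Mathlib
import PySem

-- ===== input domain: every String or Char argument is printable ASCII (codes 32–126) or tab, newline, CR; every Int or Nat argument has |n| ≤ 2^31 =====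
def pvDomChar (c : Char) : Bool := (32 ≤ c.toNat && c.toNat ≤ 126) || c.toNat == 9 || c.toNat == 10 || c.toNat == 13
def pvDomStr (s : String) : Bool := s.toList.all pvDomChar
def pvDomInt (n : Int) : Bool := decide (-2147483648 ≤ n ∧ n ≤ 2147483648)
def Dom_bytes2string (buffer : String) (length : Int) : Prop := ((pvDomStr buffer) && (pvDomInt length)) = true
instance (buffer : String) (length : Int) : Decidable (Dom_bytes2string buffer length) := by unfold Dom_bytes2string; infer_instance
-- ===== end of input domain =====

-- B replaces A's byte-by-byte loop (running index, modulo flush test, separate partial-row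
-- tail logic) by chunking the buffer up front and rendering each chunk uniformly (objective:
-- simpler decomposition; no speed claim).

-- ===== PORT A =====
-- shared rendering helpers: both Pythons contain the identical subexpressions
-- '{:02X} '.format(ord(c)) (exact for code points < 256, which covers all of Dom) and the
-- printable/whitespace ASCII-cell test with string.printable / string.whitespace.
def pvHexDigit (n : Nat) : Char := if n < 10 then Char.ofNat (48 + n) else Char.ofNat (55 + n)

def pvHexByte (c : Char) : String := String.mk [pvHexDigit (c.toNat / 16), pvHexDigit (c.toNat % 16), ' ']

-- string.printable and string.whitespace, as literal character lists
def pvPrintable : List Char :=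
  "0123456789abcdefghijklmnopqrstuvwxyzABCDEFGHIJKLMNOPQRSTUVWXYZ!\"#$%&'()*+,-./:;<=>?@[\\]^_`{|}~ \t\n".toList
    ++ [Char.ofNat 13, Char.ofNat 11, Char.ofNat 12]

def pvWhitespace : List Char := [' ', '\t', '\n', Char.ofNat 13, Char.ofNat 11, Char.ofNat 12]

def pvAsciiCell (c : Char) : String :=
  if ¬ (c ∈ pvPrintable) ∨ c ∈ pvWhitespace then " " else String.mk [c]

-- k * ' ' (Python string repetition; '' for k ≤ 0, exactly what .toNat gives)
def pvPad (k : Int) : String := String.mk (List.replicate k.toNat ' ')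

-- the for-loop of A, state (output, num_string, ascii_string, index)
def bytes2stringLoop (length : Int) :
    List Char → List String → List String → List String → Int →
    List String × List String × List String × Int
  | [], out, num, asc, index => (out, num, asc, index)
  | c :: cs, out, num, asc, index =>
    if PySem.Int.mod index length = 0 then
      bytes2stringLoop length cs
        (out ++ [PySem.Str.join "" (((num ++ [pvHexByte c]) ++ ["| "]) ++ (asc ++ [pvAsciiCell c]))])
        [] [] (index + 1)
    else
      bytes2stringLoop length cs out (num ++ [pvHexByte c]) (asc ++ [pvAsciiCell c]) (index + 1)

-- the tail 'if 0 != (len(buffer) % length)' block of A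
def pvFinish (length : Int) (buflen : Int)
    (st : List String × List String × List String × Int) : List String :=
  if PySem.Int.mod buflen length ≠ 0 then
    st.1 ++ [PySem.Str.join ""
      (((st.2.1 ++ [pvPad ((length - PySem.Int.mod buflen length) * 3)]) ++ ["| "]) ++ st.2.2.1)]
  else st.1

def bytes2string (buffer : String) (length : Int) : String :=
  PySem.Str.join "\n"
    (pvFinish length (buffer.toList.length : Int)
      (bytes2stringLoop length buffer.toList [] [] [] 1))

-- ===== PORT B =====
-- the chunks buffer[i:i+length] for i in range(0, len(buffer), length)  (length ≥ 1)
def pvChunks (L : Nat) : List Char → List (List Char)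
  | [] => []
  | c :: cs => (c :: cs.take (L - 1)) :: pvChunks L (cs.drop (L - 1))
  termination_by cs => cs.length
  decreasing_by simp

def pvRow (length : Int) (chunk : List Char) : String :=
  PySem.Str.join "" (chunk.map pvHexByte)
    ++ pvPad ((length - (chunk.length : Int)) * 3)
    ++ "| "
    ++ PySem.Str.join "" (chunk.map pvAsciiCell)

-- range(0, len(buffer), length) is empty for length < 0 (and raises for length = 0, outside Pre_)
def bytes2string_alt (buffer : String) (length : Int) : String :=
  if 0 < length then
    PySem.Str.join "\n" ((pvChunks length.toNat buffer.toList).map (pvRow length))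
  else ""


-- ===== PRECONDITION & SPEC =====
-- Pre_ excludes length ≤ 0: at length = 0 A raises ZeroDivisionError (and B ValueError), and for
-- negative length A's grouping by |length| with an always-empty pad is an accident of Python's
-- negative modulo that no hexdump caller uses; B returns the empty string there (empty range).
def Pre_bytes2string (buffer : String) (length : Int) : Prop := 0 < length
instance (buffer : String) (length : Int) : Decidable (Pre_bytes2string buffer length) := by
  unfold Pre_bytes2string; infer_instance

def pvWitness_bytes2string : String × Int := ("AB", 16)

def Spec_bytes2string (buffer : String) (length : Int) (out : String) : Prop :=
  out = bytes2string_alt buffer length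
instance (buffer : String) (length : Int) (out : String) : Decidable (Spec_bytes2string buffer length out) := by
  unfold Spec_bytes2string; infer_instance

-- ===== CLAIM (what is proved, stated in full; the proofs are below) =====
def Claim_equal_bytes2string : Prop := ∀ (buffer : String) (length : Int), Dom_bytes2string buffer length → Pre_bytes2string buffer length → Spec_bytes2string buffer length (bytes2string buffer length)


-- ===== LEMMAS AND PROOFS =====

lemma pvChunks_nil (L : Nat) : pvChunks L [] = [] := by
  rw [pvChunks.eq_def]

lemma pvChunks_cons (L : Nat) (c : Char) (cs : List Char) :
    pvChunks L (c :: cs) = (c :: cs.take (L - 1)) :: pvChunks L (cs.drop (L - 1)) := by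
  rw [pvChunks.eq_def]

lemma pvLoop_cons (length : Int) (c : Char) (cs : List Char) (out num asc : List String) (idx : Int) :
    bytes2stringLoop length (c :: cs) out num asc idx
      = if PySem.Int.mod idx length = 0 then
          bytes2stringLoop length cs
            (out ++ [PySem.Str.join "" (((num ++ [pvHexByte c]) ++ ["| "]) ++ (asc ++ [pvAsciiCell c]))])
            [] [] (idx + 1)
        else
          bytes2stringLoop length cs out (num ++ [pvHexByte c]) (asc ++ [pvAsciiCell c]) (idx + 1) := rfl

lemma pvJoinEmpty : ∀ (l : List (List Char)), PySem.Chars.join [] l = l.flatten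
  | [] => by rw [PySem.Chars.join_nil]; rfl
  | [x] => by rw [PySem.Chars.join_singleton]; simp
  | x :: y :: l => by
    rw [PySem.Chars.join_cons_cons]
    simp [pvJoinEmpty (y :: l)]

lemma pvJoin_row (xs ys : List String) (p : String) :
    PySem.Str.join "" (((xs ++ [p]) ++ ["| "]) ++ ys)
      = PySem.Str.join "" xs ++ p ++ "| " ++ PySem.Str.join "" ys := by
  apply String.ext
  simp only [PySem.Str.toList_join, String.toList_append]
  simp [pvJoinEmpty]

lemma pvJoin_row0 (xs ys : List String) :
    PySem.Str.join "" ((xs ++ ["| "]) ++ ys)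
      = PySem.Str.join "" xs ++ pvPad 0 ++ "| " ++ PySem.Str.join "" ys := by
  apply String.ext
  simp only [PySem.Str.toList_join, String.toList_append]
  simp [pvJoinEmpty, pvPad]
  rfl

lemma pvLoop_append (length : Int) (t d : List Char) :
    ∀ (out num asc : List String) (idx : Int),
      bytes2stringLoop length (t ++ d) out num asc idx
        = bytes2stringLoop length d
            (bytes2stringLoop length t out num asc idx).1
            (bytes2stringLoop length t out num asc idx).2.1
            (bytes2stringLoop length t out num asc idx).2.2.1
            (bytes2stringLoop length t out num asc idx).2.2.2 := by
  induction t with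
  | nil => intro out num asc idx; rfl
  | cons c t ih =>
    intro out num asc idx
    rw [List.cons_append, pvLoop_cons, pvLoop_cons]
    by_cases h : PySem.Int.mod idx length = 0
    · simp only [if_pos h]; exact ih _ _ _ _
    · simp only [if_neg h]; exact ih _ _ _ _

lemma pvLoop_no_flush (length : Int) :
    ∀ (cs : List Char) (out num asc : List String) (idx : Int),
      (∀ k : Nat, k < cs.length → PySem.Int.mod (idx + (k : Int)) length ≠ 0) →
      bytes2stringLoop length cs out num asc idx
        = (out, num ++ cs.map pvHexByte, asc ++ cs.map pvAsciiCell, idx + (cs.length : Int)) := by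
  intro cs
  induction cs with
  | nil => intro out num asc idx _; simp [bytes2stringLoop]
  | cons c cs ih =>
    intro out num asc idx h
    have h0 : ¬ PySem.Int.mod idx length = 0 := by simpa using h 0 (by simp)
    rw [pvLoop_cons, if_neg h0, ih _ _ _ _ (fun k hk => by
      have e : idx + 1 + (k : Int) = idx + ((k + 1 : Nat) : Int) := by push_cast; ring
      rw [e]; exact h (k + 1) (by simpa using Nat.succ_lt_succ hk))]
    simp only [Prod.mk.injEq]
    refine ⟨?_, ?_, ?_, ?_⟩
    · simp
    · simp
    · simp
    · simp only [List.length_cons]; push_cast; ring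

lemma pvLoop_flush_last (length : Int) :
    ∀ (cs : List Char), cs ≠ [] → ∀ (out num asc : List String) (idx : Int),
      (∀ k : Nat, k + 1 < cs.length → PySem.Int.mod (idx + (k : Int)) length ≠ 0) →
      PySem.Int.mod (idx + ((cs.length - 1 : Nat) : Int)) length = 0 →
      bytes2stringLoop length cs out num asc idx
        = (out ++ [PySem.Str.join ""
              (((num ++ cs.map pvHexByte) ++ ["| "]) ++ (asc ++ cs.map pvAsciiCell))],
           [], [], idx + (cs.length : Int)) := by
  intro cs
  induction cs with
  | nil => intro h; exact absurd rfl h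
  | cons c cs ih =>
    cases cs with
    | nil =>
      intro _ out num asc idx _ hfl
      have h0 : PySem.Int.mod idx length = 0 := by simpa using hfl
      rw [pvLoop_cons, if_pos h0]
      simp only [bytes2stringLoop, List.map_cons, List.map_nil, Prod.mk.injEq]
      refine ⟨?_, ?_, ?_, ?_⟩
      · simp
      · simp
      · simp
      · simp
    | cons c' cs' =>
      intro _ out num asc idx hno hfl
      have h0 : ¬ PySem.Int.mod idx length = 0 := by simpa using hno 0 (by simp)
      rw [pvLoop_cons, if_neg h0,
        ih (by simp) _ _ _ _
          (fun k hk => by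
            have e : idx + 1 + (k : Int) = idx + ((k + 1 : Nat) : Int) := by push_cast; ring
            rw [e]; exact hno (k + 1) (by simpa using Nat.succ_lt_succ hk))
          (by
            have e : idx + 1 + (((c' :: cs').length - 1 : Nat) : Int)
                = idx + (((c :: c' :: cs').length - 1 : Nat) : Int) := by
              simp only [List.length_cons, Nat.add_sub_cancel]
              push_cast; ring
            rw [e]; exact hfl)]
      simp only [Prod.mk.injEq, List.map_cons]
      refine ⟨?_, ?_, ?_, ?_⟩
      · simp [List.append_assoc]
      · simp
      · simp
      · simp only [List.length_cons]; push_cast; ring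

lemma pvFinish_congr (length a b : Int)
    (h : PySem.Int.mod a length = PySem.Int.mod b length)
    (st : List String × List String × List String × Int) :
    pvFinish length a st = pvFinish length b st := by
  unfold pvFinish; rw [h]

lemma pvMain (length : Int) (hL : 0 < length) :
    ∀ (n : Nat) (cs : List Char), cs.length ≤ n → ∀ (out : List String) (j : Int), 0 ≤ j →
      pvFinish length (cs.length : Int)
          (bytes2stringLoop length cs out [] [] (j * length + 1))
        = out ++ (pvChunks length.toNat cs).map (pvRow length) := by
  have hLn : ((length.toNat : Int)) = length := Int.toNat_of_nonneg hL.le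
  intro n
  induction n with
  | zero =>
    intro cs hcs out j hj
    have hnil : cs = [] := by cases cs <;> simp_all
    subst hnil
    simp [bytes2stringLoop, pvFinish, pvChunks_nil, PySem.Int.mod_eq_emod_of_pos hL]
  | succ n ih =>
    intro cs hcs out j hj
    match cs with
    | [] =>
      simp [bytes2stringLoop, pvFinish, pvChunks_nil, PySem.Int.mod_eq_emod_of_pos hL]
    | c :: cs' =>
      -- residues within a row: (j*length + 1 + k) % length = 1 + k   whenever 1 + k < length
      have hres : ∀ (k : Nat), (1 + (k : Int)) < length →
          PySem.Int.mod (j * length + 1 + (k : Int)) length = 1 + (k : Int) := by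
        intro k hk
        rw [PySem.Int.mod_eq_emod_of_pos hL]
        have e : j * length + 1 + (k : Int) = (1 + (k : Int)) + length * j := by ring
        rw [e, Int.add_mul_emod_self_left, Int.emod_eq_of_lt (by positivity) hk]
      rw [pvChunks_cons]
      by_cases hbig : length.toNat ≤ (c :: cs').length
      · -- full first chunk
        have h1 : 1 ≤ length.toNat := by omega
        have hcs'len : length.toNat - 1 ≤ cs'.length := by
          simp only [List.length_cons] at hbig; omega
        have htlen : (c :: cs'.take (length.toNat - 1)).length = length.toNat := by
          simp [List.length_take, Nat.min_eq_left hcs'len]; omega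
        have hsplit : c :: cs' = (c :: cs'.take (length.toNat - 1)) ++ cs'.drop (length.toNat - 1) := by
          simp [List.take_append_drop]
        conv_lhs => rw [hsplit]
        rw [pvLoop_append,
          pvLoop_flush_last length (c :: cs'.take (length.toNat - 1)) (by simp) out [] []
            (j * length + 1)
            (fun k hk => by
              rw [htlen] at hk
              rw [hres k (by omega)]
              omega)
            (by
              rw [htlen]
              have e : j * length + 1 + (((length.toNat - 1 : Nat)) : Int) = length * (j + 1) := by
                push_cast [Nat.cast_sub h1, hLn]
                ring
              rw [PySem.Int.mod_eq_emod_of_pos hL, e, Int.mul_emod_right])]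
        dsimp only
        simp only [List.nil_append]
        have hidx : j * length + 1 + (((c :: cs'.take (length.toNat - 1)).length : Nat) : Int)
            = (j + 1) * length + 1 := by
          rw [htlen, hLn]; ring
        rw [hidx]
        have hmodeq : PySem.Int.mod ((((c :: cs'.take (length.toNat - 1))
                ++ cs'.drop (length.toNat - 1)).length : Nat) : Int) length
            = PySem.Int.mod (((cs'.drop (length.toNat - 1)).length : Nat) : Int) length := by
          rw [PySem.Int.mod_eq_emod_of_pos hL, PySem.Int.mod_eq_emod_of_pos hL]
          have e : ((((c :: cs'.take (length.toNat - 1)) ++ cs'.drop (length.toNat - 1)).length : Nat) : Int)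
              = (((cs'.drop (length.toNat - 1)).length : Nat) : Int) + length * 1 := by
            rw [List.length_append, htlen]
            push_cast
            rw [hLn]
            ring
          rw [e, Int.add_mul_emod_self_left]
        rw [pvFinish_congr length _ _ hmodeq,
          ih (cs'.drop (length.toNat - 1))
            (by simp only [List.length_drop]; simp only [List.length_cons] at hcs; omega)
            _ (j + 1) (by omega)]
        have hrow : PySem.Str.join ""
              (((c :: cs'.take (length.toNat - 1)).map pvHexByte ++ ["| "])
                ++ (c :: cs'.take (length.toNat - 1)).map pvAsciiCell)
            = pvRow length (c :: cs'.take (length.toNat - 1)) := by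
          rw [pvJoin_row0]
          unfold pvRow
          rw [htlen, hLn]
          simp
        rw [hrow, List.map_cons]
        simp
      · -- short final chunk (the padded tail row of A)
        have hsmall : (c :: cs').length < length.toNat := by omega
        have htake : cs'.take (length.toNat - 1) = cs' := by
          apply List.take_of_length_le
          simp only [List.length_cons] at hsmall; omega
        have hdrop : cs'.drop (length.toNat - 1) = [] := by
          apply List.drop_eq_nil_of_le
          simp only [List.length_cons] at hsmall; omega
        rw [htake, hdrop, pvChunks_nil]
        rw [pvLoop_no_flush length (c :: cs') out [] [] (j * length + 1)
          (fun k hk => by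
            rw [hres k (by
              simp only [List.length_cons] at hk hsmall
              omega)]
            omega)]
        unfold pvFinish
        dsimp only
        have hm : PySem.Int.mod (((c :: cs').length : Nat) : Int) length
            = (((c :: cs').length : Nat) : Int) := by
          rw [PySem.Int.mod_eq_emod_of_pos hL,
            Int.emod_eq_of_lt (by positivity) (by
              simp only [List.length_cons] at hsmall ⊢
              omega)]
        rw [hm]
        have hne : ¬ ((((c :: cs').length : Nat) : Int) = 0) := by
          simp only [List.length_cons]; push_cast; omega
        rw [if_pos hne]
        simp only [List.nil_append]
        rw [pvJoin_row]
        unfold pvRow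
        simp

-- ===== VERDICT (by name: the statement is the Claim_ definition above) =====
theorem bytes2string_spec : Claim_equal_bytes2string := by
  intro buffer length _ hPre
  unfold Spec_bytes2string
  have hL : 0 < length := hPre
  have h := pvMain length hL buffer.toList.length buffer.toList le_rfl [] 0 le_rfl
  simp only [zero_mul, zero_add, List.nil_append] at h
  unfold bytes2string bytes2string_alt
  rw [if_pos hL, h]
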